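-- pv_equiv track=rewrite | github.com/aceynk/charlotteworld-fishy | util.py | even_spread
-- ===== SOURCE A (Python) =====
-- def even_spread(l_max, amount):
--     d_am = min(min(l_max),amount // len(l_max))
--     l_max = [x - d_am for x in l_max]
--     amount -= d_am * len(l_max)
--
--     pos = 0
--     while amount != 0:
--         if l_max[pos] == 0:
--             pos += 1
--             pos %= len(l_max)
--             continue
--
--         l_max[pos] -= 1
--         amount -= 1
--         pos += 1
--         pos %= len(l_max)
--
--     return l_max
-- ===== SOURCE B (Python) =====
-- def even_spread(l_max, amount):
--     n = len(l_max)
--     d_am = min(min(l_max), amount // n)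
--     v = [x - d_am for x in l_max]
--     m = amount - d_am * n
--     # "water-fill": binary-search the number r of complete round-robin rounds,
--     # then hand out the remaining decrements to the first positive entries.
--     def drained(r):
--         return sum(x if x < r else r for x in v)
--     lo, hi = 0, max(v)
--     while lo < hi:
--         mid = (lo + hi + 1) // 2
--         if drained(mid) <= m:
--             lo = mid
--         else:
--             hi = mid - 1
--     r = lo
--     rem = m - drained(r)
--     out = []
--     for x in v:
--         y = x - r if x > r else 0
--         if rem > 0 and y > 0:
--             y -= 1
--             rem -= 1
--         out.append(y)
--     return out
-- ===== Notes on version B (the rewrite author's own statement) =====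
-- stated objective: faster
-- what changed: A hands out the decrements one at a time in a round-robin while loop; B computes the number of complete leveling rounds by binary search on the drained amount (water-fill) and assigns the remainder to the first still-positive entries in one pass.
import Mathlib
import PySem

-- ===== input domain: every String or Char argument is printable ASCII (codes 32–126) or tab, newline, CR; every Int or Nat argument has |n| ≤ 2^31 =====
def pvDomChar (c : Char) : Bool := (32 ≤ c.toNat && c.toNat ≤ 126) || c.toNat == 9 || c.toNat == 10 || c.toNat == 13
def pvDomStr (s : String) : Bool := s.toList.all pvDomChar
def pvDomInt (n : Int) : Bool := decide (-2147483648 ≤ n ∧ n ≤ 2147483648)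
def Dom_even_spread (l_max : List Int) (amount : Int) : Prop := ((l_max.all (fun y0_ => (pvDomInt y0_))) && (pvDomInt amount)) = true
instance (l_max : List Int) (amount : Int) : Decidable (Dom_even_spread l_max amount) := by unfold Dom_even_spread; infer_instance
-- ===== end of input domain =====

-- B replaces A's one-decrement-at-a-time round-robin loop by a water-fill: binary search for the
-- number of complete rounds, then a single pass handing the remainder to the first positive
-- entries (objective: faster). A mutates only a local copy of l_max; no caller-visible mutation.


-- ===== PORT A =====
-- the while loop of A, with fuel; under Pre_ the fuel given below is sufficient (proved),
-- so the fuel-0 / IndexError fallbacks are never taken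
def esLoopA : Nat → List Int → Int → Int → List Int
  | 0, l, _, _ => l
  | f + 1, l, amount, pos =>
    if amount = 0 then l
    else
      match PySem.List.pyGet? l pos with
      | none => l  -- IndexError (unreachable: pos stays in range)
      | some x =>
        if x = 0 then
          esLoopA f l amount (PySem.Int.mod (pos + 1) (l.length : Int))
        else
          esLoopA f (PySem.List.pySetD l pos (x - 1)) (amount - 1)
            (PySem.Int.mod (pos + 1) (l.length : Int))

def even_spread (l_max : List Int) (amount : Int) : List Int :=
  match PySem.List.min? l_max (fun x => x) with
  | none => []  -- min([]) raises ValueError; excluded by Pre_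
  | some mn =>
    let n : Int := l_max.length
    let d_am : Int := min mn (PySem.Int.floordiv amount n)
    let l2 := l_max.map (fun x => x - d_am)
    let am2 := amount - d_am * n
    esLoopA ((am2.toNat + 1) * (l2.length + 1)) l2 am2 0

-- ===== PORT B =====
def esDrained (v : List Int) (r : Int) : Int := (v.map (fun x => if x < r then x else r)).sum

-- binary search for the largest r in [lo, hi] with esDrained v r ≤ m (fuel : interval length)
def esSearch : Nat → List Int → Int → Int → Int → Int
  | 0, _, _, lo, _ => lo
  | f + 1, v, m, lo, hi =>
    if lo < hi then
      let mid := PySem.Int.floordiv (lo + hi + 1) 2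
      if esDrained v mid ≤ m then esSearch f v m mid hi
      else esSearch f v m lo (mid - 1)
    else lo

def esAssign : List Int → Int → Int → List Int
  | [], _, _ => []
  | x :: v, r, rem =>
    let y := if x > r then x - r else 0
    if rem > 0 ∧ y > 0 then (y - 1) :: esAssign v r (rem - 1)
    else y :: esAssign v r rem

def even_spread_alt (l_max : List Int) (amount : Int) : List Int :=
  match PySem.List.min? l_max (fun x => x) with
  | none => []  -- min([]) raises ValueError; excluded by Pre_
  | some mn =>
    let n : Int := l_max.length
    let d_am : Int := min mn (PySem.Int.floordiv amount n)
    let v := l_max.map (fun x => x - d_am)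
    let m := amount - d_am * n
    match PySem.List.max? v (fun x => x) with
    | none => []
    | some hi =>
      let r := esSearch (hi.toNat + 1) v m 0 hi
      let rem := m - esDrained v r
      esAssign v r rem

-- ===== PRECONDITION & SPEC =====
-- Pre_ excludes the empty list (A raises ValueError/ZeroDivisionError) and amount > sum(l_max),
-- on which A's while loop never terminates (it skips zeros forever).
def Pre_even_spread (l_max : List Int) (amount : Int) : Prop :=
  l_max ≠ [] ∧ amount ≤ l_max.sum
instance (l_max : List Int) (amount : Int) : Decidable (Pre_even_spread l_max amount) := by
  unfold Pre_even_spread; infer_instance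

def pvWitness_even_spread : List Int × Int := ([1, 3, 2], 4)

def Spec_even_spread (l_max : List Int) (amount : Int) (out : List Int) : Prop := out = even_spread_alt l_max amount
instance (l_max : List Int) (amount : Int) (out : List Int) : Decidable (Spec_even_spread l_max amount out) := by unfold Spec_even_spread; infer_instance

-- ===== CLAIM (what is proved, stated in full; the proofs are below) =====
def Claim_equal_even_spread : Prop := ∀ (l_max : List Int) (amount : Int), Dom_even_spread l_max amount → Pre_even_spread l_max amount → Spec_even_spread l_max amount (even_spread l_max amount)

-- ===== LEMMAS AND PROOFS =====

-- decrement every nonzero entry by 1 (one full round of A's loop)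
def esDec1 (v : List Int) : List Int := v.map (fun x => if x = 0 then x else x - 1)

-- number of nonzero entries
def esCnt (v : List Int) : Nat := v.countP (fun x => x ≠ 0)

-- decrement the first m nonzero entries by 1
def esDecFirst : Int → List Int → List Int
  | _, [] => []
  | m, x :: b => if m = 0 then x :: b else if x = 0 then x :: esDecFirst m b
      else (x - 1) :: esDecFirst (m - 1) b

-- state after r complete rounds
def esDrop (r : Int) (v : List Int) : List Int := v.map (fun x => if r < x then x - r else 0)

lemma esLoopA_zero (f : Nat) (l : List Int) (pos : Int) : esLoopA f l 0 pos = l := by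
  cases f <;> simp [esLoopA]

lemma set_append_len (a b : List Int) (x y : Int) :
    (a ++ x :: b).set a.length y = a ++ y :: b := by
  induction a with
  | nil => simp
  | cons h t ih => simp [ih]

lemma esDecFirst_zero (w : List Int) : esDecFirst 0 w = w := by
  cases w <;> simp [esDecFirst]

lemma esDec1_of_forall_zero (b : List Int) (h : ∀ x ∈ b, x = 0) : esDec1 b = b := by
  induction b with
  | nil => rfl
  | cons x t ih =>
    have hx : x = 0 := h x (by simp)
    simp [esDec1, hx] at *
    exact ih (fun y hy => h y (by simp [hy]))

-- one pass over the suffix b (positions a.length .. end), then wrap to position 0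
lemma esLoopA_suffix (b : List Int) : ∀ (a : List Int) (f : Nat) (m : Int), b ≠ [] → 0 ≤ m →
    (∀ x ∈ b, 0 ≤ x) →
    esLoopA (b.length + f) (a ++ b) m (a.length : Int) =
      if ((esCnt b : Int) ≤ m) then esLoopA f (a ++ esDec1 b) (m - esCnt b) 0
      else a ++ esDecFirst m b := by
  induction b with
  | nil => intro a f m h; cases h rfl
  | cons x b' ih =>
    intro a f m _ hm hnn
    have hx0 : 0 ≤ x := hnn x (by simp)
    by_cases hm0 : m = 0
    · subst hm0
      rw [esLoopA_zero]
      by_cases hc : ((esCnt (x :: b') : Nat) : Int) ≤ 0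
      · have hcz : esCnt (x :: b') = 0 := by omega
        have hall : ∀ y ∈ x :: b', y = 0 := by
          intro y hy
          have h2 := List.countP_eq_zero.mp hcz y hy
          simpa using h2
        rw [if_pos hc, esDec1_of_forall_zero _ hall]
        simp [hcz, esLoopA_zero]
      · rw [if_neg hc, esDecFirst_zero]
    · have hfuel : (x :: b').length + f = (b'.length + f) + 1 := by simp; omega
      rw [hfuel]
      simp only [esLoopA, if_neg hm0, PySem.List.pyGet?_append_length]
      by_cases hb' : b' = []
      · subst hb'
        have hmod : PySem.Int.mod ((a.length : Int) + 1) (((a ++ [x]).length : Int)) = 0 := by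
          rw [PySem.Int.mod_eq_emod_of_pos (by simp)]
          simp
        by_cases hxz : x = 0
        · subst hxz
          rw [if_pos rfl, hmod]
          have : ((esCnt [(0:Int)] : Nat) : Int) ≤ m := by simp [esCnt]; omega
          rw [if_pos this]
          simp [esCnt, esDec1]
        · rw [if_neg hxz, PySem.List.pySetD_natCast, set_append_len, hmod]
          have : ((esCnt [x] : Nat) : Int) ≤ m := by simp [esCnt, hxz]; omega
          rw [if_pos this]
          simp [esCnt, esDec1, hxz]
      · have hmod : PySem.Int.mod ((a.length : Int) + 1) (((a ++ x :: b').length : Int)) =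
            ((a ++ [x]).length : Int) := by
          rw [PySem.Int.mod_eq_emod_of_pos (by simp; omega)]
          rw [Int.emod_eq_of_lt (by omega)]
          · simp
          · have : b'.length ≠ 0 := by simpa [List.length_eq_zero_iff] using hb'
            simp; omega
        have hnn' : ∀ y ∈ b', 0 ≤ y := fun y hy => hnn y (by simp [hy])
        by_cases hxz : x = 0
        · subst hxz
          rw [if_pos rfl, hmod]
          have hsplit : a ++ (0:Int) :: b' = (a ++ [0]) ++ b' := by simp
          rw [hsplit, ih (a ++ [0]) f m hb' hm hnn']
          have hcnt : esCnt ((0:Int) :: b') = esCnt b' := by simp [esCnt]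
          rw [hcnt]
          by_cases hc : ((esCnt b' : Nat) : Int) ≤ m
          · rw [if_pos hc, if_pos hc]
            have : esDec1 ((0:Int) :: b') = 0 :: esDec1 b' := by simp [esDec1]
            rw [this]
            simp
          · rw [if_neg hc, if_neg hc]
            have : esDecFirst m ((0:Int) :: b') = 0 :: esDecFirst m b' := by
              simp [esDecFirst, hm0]
            rw [this]
            simp
        · rw [if_neg hxz, PySem.List.pySetD_natCast, set_append_len, hmod]
          have hsplit : a ++ (x - 1) :: b' = (a ++ [x - 1]) ++ b' := by simp
          have hlen3 : ((a ++ [x]).length : Int) = ((a ++ [x - 1]).length : Int) := by simp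
          rw [hsplit, hlen3, ih (a ++ [x - 1]) f (m - 1) hb' (by omega) hnn']
          have hcnt : esCnt (x :: b') = esCnt b' + 1 := by simp [esCnt, hxz]
          rw [hcnt]
          by_cases hc : ((esCnt b' : Nat) : Int) ≤ m - 1
          · rw [if_pos hc, if_pos (by push_cast; omega)]
            have : esDec1 (x :: b') = (x - 1) :: esDec1 b' := by simp [esDec1, hxz]
            rw [this]
            have : m - 1 - (esCnt b' : Int) = m - ((esCnt b' + 1 : Nat) : Int) := by
              push_cast; ring
            rw [this]
            simp
          · rw [if_neg hc, if_neg (by push_cast; omega)]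
            have : esDecFirst m (x :: b') = (x - 1) :: esDecFirst (m - 1) b' := by
              simp [esDecFirst, hm0, hxz]
            rw [this]
            simp

lemma esDrained_nonneg (v : List Int) (r : Int) (hv : ∀ x ∈ v, 0 ≤ x) (hr : 0 ≤ r) :
    0 ≤ esDrained v r := by
  induction v with
  | nil => simp [esDrained]
  | cons x t ih =>
    have hx := hv x (by simp)
    have ht := ih (fun y hy => hv y (by simp [hy]))
    simp only [esDrained, List.map_cons, List.sum_cons] at *
    split <;> omega

lemma esDrained_succ (v : List Int) (r : Int) :
    esDrained v (r + 1) = esDrained v r + (esCnt (esDrop r v) : Int) := by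
  induction v with
  | nil => simp [esDrained, esCnt, esDrop]
  | cons x t ih =>
    simp only [esDrained, esCnt, esDrop, List.map_cons, List.sum_cons, List.countP_cons] at *
    split_ifs <;> simp_all <;> omega

lemma esDrained_zero (v : List Int) (hv : ∀ x ∈ v, 0 ≤ x) : esDrained v 0 = 0 := by
  induction v with
  | nil => rfl
  | cons x t ih =>
    have hx := hv x (by simp)
    have := ih (fun y hy => hv y (by simp [hy]))
    simp only [esDrained, List.map_cons, List.sum_cons] at *
    split <;> omega

lemma esDrop_zero (v : List Int) (hv : ∀ x ∈ v, 0 ≤ x) : esDrop 0 v = v := by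
  induction v with
  | nil => rfl
  | cons x t ih =>
    have hx := hv x (by simp)
    have := ih (fun y hy => hv y (by simp [hy]))
    simp only [esDrop, List.map_cons] at *
    rw [this]
    split <;> [skip; skip] <;> congr 1 <;> omega

lemma esDrained_esDec1 (v : List Int) (k : Int) (hv : ∀ x ∈ v, 0 ≤ x) (hk : 0 ≤ k) :
    esDrained (esDec1 v) k = esDrained v (k + 1) - esCnt v := by
  induction v with
  | nil => simp [esDrained, esDec1, esCnt]
  | cons x t ih =>
    have hx := hv x (by simp)
    have := ih (fun y hy => hv y (by simp [hy]))
    simp only [esDrained, esDec1, esCnt, List.map_cons, List.sum_cons, List.countP_cons] at *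
    split_ifs <;> simp_all <;> omega

lemma esDrop_esDec1 (v : List Int) (k : Int) (hv : ∀ x ∈ v, 0 ≤ x) (hk : 0 ≤ k) :
    esDrop k (esDec1 v) = esDrop (k + 1) v := by
  induction v with
  | nil => rfl
  | cons x t ih =>
    have hx := hv x (by simp)
    have := ih (fun y hy => hv y (by simp [hy]))
    simp only [esDrop, esDec1, List.map_cons] at *
    rw [this]
    split_ifs <;> simp_all <;> omega

lemma esCnt_le_esDrained (v : List Int) (k : Int) (hv : ∀ x ∈ v, 0 ≤ x) (hk : 1 ≤ k) :
    (esCnt v : Int) ≤ esDrained v k := by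
  induction v with
  | nil => simp [esCnt, esDrained]
  | cons x t ih =>
    have hx := hv x (by simp)
    have := ih (fun y hy => hv y (by simp [hy]))
    simp only [esCnt, esDrained, List.map_cons, List.sum_cons, List.countP_cons] at *
    split_ifs <;> simp_all <;> omega

lemma esDec1_nonneg (v : List Int) (hv : ∀ x ∈ v, 0 ≤ x) : ∀ x ∈ esDec1 v, 0 ≤ x := by
  intro x hx
  simp only [esDec1, List.mem_map] at hx
  obtain ⟨y, hy, rfl⟩ := hx
  have := hv y hy
  split <;> omega

-- k complete rounds at once
lemma esLoopA_rounds (k : Nat) : ∀ (v : List Int) (f : Nat) (m : Int), v ≠ [] → 0 ≤ m →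
    (∀ x ∈ v, 0 ≤ x) → esDrained v (k : Int) ≤ m →
    esLoopA (k * v.length + f) v m 0 =
      esLoopA f (esDrop (k : Int) v) (m - esDrained v (k : Int)) 0 := by
  induction k with
  | zero =>
    intro v f m _ _ hv _
    simp only [Nat.cast_zero]
    rw [esDrop_zero v hv, esDrained_zero v hv]
    simp
  | succ k ih =>
    intro v f m hne hm hv hdk
    have hfuel : (k + 1) * v.length + f = v.length + (k * v.length + f) := by ring
    rw [hfuel]
    have hcnt : (esCnt v : Int) ≤ m := by
      have h1 : (esCnt v : Int) ≤ esDrained v ((k : Int) + 1) :=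
        esCnt_le_esDrained v ((k : Int) + 1) hv (by omega)
      have : ((k + 1 : Nat) : Int) = (k : Int) + 1 := by push_cast; ring
      rw [this] at hdk
      omega
    have hs := esLoopA_suffix v [] (k * v.length + f) m hne hm hv
    simp only [List.nil_append, List.length_nil, Nat.cast_zero] at hs
    rw [hs, if_pos hcnt]
    have hne' : esDec1 v ≠ [] := by
      simp only [esDec1]
      simpa using hne
    have hv' := esDec1_nonneg v hv
    have hlen' : (esDec1 v).length = v.length := by simp [esDec1]
    have hd' : esDrained (esDec1 v) (k : Int) ≤ m - esCnt v := by
      rw [esDrained_esDec1 v (k : Int) hv (by omega)]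
      have : ((k + 1 : Nat) : Int) = (k : Int) + 1 := by push_cast; ring
      rw [this] at hdk
      omega
    rw [show k * v.length + f = k * (esDec1 v).length + f by rw [hlen']]
    rw [ih (esDec1 v) f (m - esCnt v) hne' (by omega) hv' hd']
    rw [esDrop_esDec1 v (k : Int) hv (by omega),
      esDrained_esDec1 v (k : Int) hv (by omega)]
    have e1 : ((k + 1 : Nat) : Int) = (k : Int) + 1 := by push_cast; ring
    rw [e1]
    congr 1
    ring

lemma esSearch_spec (v : List Int) (m mx : Int) (_hm : 0 ≤ m)
    (_hv : ∀ x ∈ v, 0 ≤ x) (_hmx : ∀ x ∈ v, x ≤ mx) :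
    ∀ (f : Nat) (lo hi : Int), 0 ≤ lo → lo ≤ hi → (hi - lo).toNat < f →
    esDrained v lo ≤ m → (m < esDrained v (hi + 1) ∨ mx ≤ hi) →
    0 ≤ esSearch f v m lo hi ∧ esSearch f v m lo hi ≤ hi ∧
      esDrained v (esSearch f v m lo hi) ≤ m ∧
      (m < esDrained v (esSearch f v m lo hi + 1) ∨ mx ≤ esSearch f v m lo hi) := by
  intro f
  induction f with
  | zero => intro lo hi hlo hlh hfuel _ _; omega
  | succ f ih =>
    intro lo hi hlo hlh hfuel hdlo hinv
    simp only [esSearch]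
    by_cases h : lo < hi
    · rw [if_pos h]
      have hmb : lo + 1 ≤ PySem.Int.floordiv (lo + hi + 1) 2 ∧
          PySem.Int.floordiv (lo + hi + 1) 2 ≤ hi := by
        have hb := PySem.Int.floordiv_two_mid_bounds (lo := lo + 1) (hi := hi) (by omega)
        have e : lo + 1 + hi = lo + hi + 1 := by ring
        rw [e] at hb
        omega
      by_cases hd : esDrained v (PySem.Int.floordiv (lo + hi + 1) 2) ≤ m
      · rw [if_pos hd]
        exact ih (PySem.Int.floordiv (lo + hi + 1) 2) hi (by omega) (by omega) (by omega) hd hinv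
      · rw [if_neg hd]
        have hinv' : m < esDrained v (PySem.Int.floordiv (lo + hi + 1) 2 - 1 + 1) ∨
            mx ≤ PySem.Int.floordiv (lo + hi + 1) 2 - 1 := by
          left
          have e : PySem.Int.floordiv (lo + hi + 1) 2 - 1 + 1 =
              PySem.Int.floordiv (lo + hi + 1) 2 := by ring
          rw [e]
          omega
        obtain ⟨h1, h2, h3, h4⟩ :=
          ih lo (PySem.Int.floordiv (lo + hi + 1) 2 - 1) hlo (by omega) (by omega) hdlo hinv'
        exact ⟨h1, by omega, h3, h4⟩
    · rw [if_neg h]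
      have : lo = hi := by omega
      subst this
      exact ⟨hlo, le_rfl, hdlo, hinv⟩

lemma esAssign_eq (v : List Int) : ∀ (r rem : Int), 0 ≤ rem →
    esAssign v r rem = esDecFirst rem (esDrop r v) := by
  induction v with
  | nil => intro r rem _; simp [esAssign, esDrop, esDecFirst]
  | cons x t ih =>
    intro r rem hrem
    simp only [esAssign, esDrop, List.map_cons, esDecFirst]
    by_cases hx : x > r
    · simp only [if_pos hx]
      by_cases h : rem > 0 ∧ x - r > 0
      · rw [if_pos h, if_neg (by omega : ¬ rem = 0), if_neg (by omega : ¬ x - r = 0)]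
        rw [ih r (rem - 1) (by omega)]
        rfl
      · have hrem0 : rem = 0 := by omega
        rw [if_neg h, if_pos hrem0, hrem0, ih r 0 le_rfl]
        simp [esDecFirst_zero, esDrop]
    · simp only [if_neg hx]
      by_cases h : rem > 0 ∧ (0:Int) > 0
      · omega
      · rw [if_neg h, ih r rem hrem]
        by_cases hrem0 : rem = 0
        · subst hrem0; simp [esDecFirst_zero, esDrop]
        · simp [esDrop, hrem0]

lemma sum_map_sub (l : List Int) (d : Int) :
    (l.map (fun x => x - d)).sum = l.sum - (l.length : Int) * d := by
  induction l with
  | nil => simp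
  | cons x t ih =>
    simp only [List.map_cons, List.sum_cons, List.length_cons, ih]
    push_cast
    ring

lemma esDrained_all (v : List Int) (r : Int) (h : ∀ x ∈ v, x ≤ r) : esDrained v r = v.sum := by
  induction v with
  | nil => rfl
  | cons x t ih =>
    have hx := h x (by simp)
    have := ih (fun y hy => h y (by simp [hy]))
    simp only [esDrained, List.map_cons, List.sum_cons] at *
    split <;> omega

lemma le_esDrained_of_mem (v : List Int) (r y : Int) (hy : y ∈ v) (hr : 0 ≤ r) (hry : r ≤ y)
    (hv : ∀ x ∈ v, 0 ≤ x) : r ≤ esDrained v r := by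
  induction v with
  | nil => cases hy
  | cons x t ih =>
    have hx := hv x (by simp)
    have hnn := esDrained_nonneg t r (fun z hz => hv z (by simp [hz])) hr
    rcases List.mem_cons.mp hy with rfl | hyt
    · simp only [esDrained, List.map_cons, List.sum_cons] at *
      split <;> omega
    · have := ih hyt (fun z hz => hv z (by simp [hz]))
      simp only [esDrained, List.map_cons, List.sum_cons] at *
      split <;> omega

-- ===== VERDICT (by name: the statement is the Claim_ definition above) =====
theorem even_spread_spec : Claim_equal_even_spread := by
  unfold Claim_equal_even_spread
  intro l amount _ hpre
  obtain ⟨hne, hsum⟩ := hpre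
  unfold Spec_even_spread even_spread even_spread_alt
  obtain ⟨mn, hmn⟩ : ∃ mn, PySem.List.min? l (fun x => x) = some mn := by
    cases h : PySem.List.min? l (fun x => x) with
    | none => exact absurd ((PySem.List.min?_eq_none_iff l (fun x => x)).mp h) hne
    | some mn => exact ⟨mn, rfl⟩
  rw [hmn]
  dsimp only
  have hlpos : 0 < l.length := List.length_pos_of_ne_nil hne
  have hnpos : 0 < (l.length : Int) := by exact_mod_cast hlpos
  set d := min mn (PySem.Int.floordiv amount (l.length : Int)) with hd
  set v := l.map (fun x => x - d) with hv
  set m := amount - d * (l.length : Int) with hm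
  have hvne : v ≠ [] := by simp [hv, hne]
  have hnonneg : ∀ x ∈ v, 0 ≤ x := by
    intro x hx
    rw [hv] at hx
    obtain ⟨y, hy, rfl⟩ := List.mem_map.mp hx
    have h1 := PySem.List.min?_isMin hmn y hy
    have h2 : d ≤ mn := min_le_left _ _
    simp at h1
    omega
  have hm0 : 0 ≤ m := by
    have h1 := PySem.Int.floordiv_mul_add_mod amount (l.length : Int)
    have h2 : 0 ≤ PySem.Int.mod amount (l.length : Int) := PySem.Int.mod_nonneg amount hnpos
    have h3 : d ≤ PySem.Int.floordiv amount (l.length : Int) := min_le_right _ _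
    have h4 : d * (l.length : Int) ≤ PySem.Int.floordiv amount (l.length : Int) * (l.length : Int) :=
      mul_le_mul_of_nonneg_right h3 (le_of_lt hnpos)
    omega
  have hlenv : v.length = l.length := by simp [hv]
  have hsumv : m ≤ v.sum := by
    have e := sum_map_sub l d
    rw [← hv] at e
    have hc : (l.length : Int) * d = d * (l.length : Int) := mul_comm _ _
    omega
  obtain ⟨mx, hmx⟩ : ∃ mx, PySem.List.max? v (fun x => x) = some mx := by
    cases h : PySem.List.max? v (fun x => x) with
    | none => exact absurd ((PySem.List.max?_eq_none_iff v (fun x => x)).mp h) hvne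
    | some mx => exact ⟨mx, rfl⟩
  rw [hmx]
  dsimp only
  have hmxmem := PySem.List.max?_mem hmx
  have hmxmax : ∀ x ∈ v, x ≤ mx := by
    intro x hx
    simpa using PySem.List.max?_isMax hmx x hx
  have hmx0 : 0 ≤ mx := hnonneg mx hmxmem
  obtain ⟨hr0, hrhi, hrle, hrinv⟩ := esSearch_spec v m mx hm0 hnonneg hmxmax (mx.toNat + 1) 0 mx
    le_rfl hmx0 (by omega) (by rw [esDrained_zero v hnonneg]; exact hm0) (Or.inr le_rfl)
  set r := esSearch (mx.toNat + 1) v m 0 mx with hr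
  set rem := m - esDrained v r with hrem
  have hrem0 : 0 ≤ rem := by omega
  have hrm : r ≤ m := le_trans (le_esDrained_of_mem v r mx hmxmem hr0 hrhi hnonneg) hrle
  have hrt : (r.toNat : Int) = r := Int.toNat_of_nonneg hr0
  obtain ⟨fr, hfr⟩ : ∃ fr, (m.toNat + 1) * (v.length + 1) = r.toNat * v.length + (v.length + fr) := by
    have h1 : r.toNat ≤ m.toNat := by omega
    have h2 : (r.toNat + 1) * v.length ≤ (m.toNat + 1) * (v.length + 1) := by
      calc (r.toNat + 1) * v.length ≤ (m.toNat + 1) * v.length :=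
            Nat.mul_le_mul_right _ (by omega)
        _ ≤ (m.toNat + 1) * (v.length + 1) := Nat.mul_le_mul_left _ (by omega)
    have h3 : (r.toNat + 1) * v.length = r.toNat * v.length + v.length := by ring
    exact ⟨(m.toNat + 1) * (v.length + 1) - (r.toNat * v.length + v.length), by omega⟩
  rw [hfr, esLoopA_rounds r.toNat v (v.length + fr) m hvne hm0 hnonneg (by rw [hrt]; exact hrle),
    hrt, esAssign_eq v r rem hrem0, ← hrem]
  by_cases hz : rem = 0
  · rw [hz, esLoopA_zero, esDecFirst_zero]
  · have hwne : esDrop r v ≠ [] := by simp [esDrop, hvne]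
    have hwnn : ∀ x ∈ esDrop r v, 0 ≤ x := by
      intro x hx
      obtain ⟨y, hy, rfl⟩ := List.mem_map.mp (by simpa [esDrop] using hx)
      split <;> omega
    have hcnt : rem < (esCnt (esDrop r v) : Int) := by
      rcases hrinv with hlt | hge
      · have := esDrained_succ v r
        omega
      · have : esDrained v r = v.sum := esDrained_all v r (fun x hx => le_trans (hmxmax x hx) hge)
        omega
    have hlw : (esDrop r v).length = v.length := by simp [esDrop]
    have hs := esLoopA_suffix (esDrop r v) [] fr rem hwne hrem0 hwnn
    simp only [List.nil_append, List.length_nil, Nat.cast_zero] at hs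
    rw [hlw] at hs
    rw [hs, if_neg (by omega)]
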